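-- pv_equiv track=rewrite | github.com/MrRedhu/cse571-aairobots-portfolio | hw2-planning/scripts/refinement.py | _simplify_primitives
-- ===== SOURCE A (Python) =====
-- def _simplify_primitives(prims):
--     """
--     Peephole simplifier for low-level primitives.
--     - Cancels opposite turns back-to-back (TurnCW, TurnCCW) or (TurnCCW, TurnCW).
--     - Compresses triple turns: TurnCW x3 -> TurnCCW, TurnCCW x3 -> TurnCW.
--     """
--     stack = []
--     for p in prims:
--         if stack and (
--             (stack[-1] == "TurnCW" and p == "TurnCCW")
--             or (stack[-1] == "TurnCCW" and p == "TurnCW")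
--         ):
--             stack.pop()
--         else:
--             stack.append(p)
--
--     changed = True
--     while changed:
--         changed = False
--         i = 0
--         while i <= len(stack) - 3:
--             tri = stack[i:i + 3]
--             if tri == ["TurnCW", "TurnCW", "TurnCW"]:
--                 stack[i:i + 3] = ["TurnCCW"]
--                 changed = True
--             elif tri == ["TurnCCW", "TurnCCW", "TurnCCW"]:
--                 stack[i:i + 3] = ["TurnCW"]
--                 changed = True
--             else:
--                 i += 1
--
--     return stack
-- ===== SOURCE B (Python) =====
-- _OPPOSITE = {"TurnCW": "TurnCCW", "TurnCCW": "TurnCW"}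
--
--
-- def _compress_once(s):
--     """One left-to-right sweep: collapse each run of three identical turns
--     into the opposite turn, re-examining the result immediately."""
--     out = []
--     i = 0
--     n = len(s)
--     while i < n:
--         cur = s[i]
--         i += 1
--         while cur in _OPPOSITE and i + 1 < n and s[i] == cur and s[i + 1] == cur:
--             cur = _OPPOSITE[cur]
--             i += 2
--         out.append(cur)
--     return out
--
--
-- def _simplify_primitives(prims):
--     # Cancel adjacent opposite turns with a stack.
--     stack = []
--     for p in prims:
--         if stack and p == _OPPOSITE.get(stack[-1]):
--             stack.pop()
--         else:
--             stack.append(p)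
--     # Compress triple turns: sweep until a fixpoint is reached.
--     while True:
--         nxt = _compress_once(stack)
--         if nxt == stack:
--             return stack
--         stack = nxt
-- ===== Notes on version B (the rewrite author's own statement) =====
-- stated objective: alternative
-- what changed: B replaces A's in-place slice-assignment scan (stack[i:i+3] = [...] with index rescans under a changed flag) by a functional single-pass sweep that collapses triples with immediate re-examination of the produced token, repeated until a fixpoint; phase-1 cancellation uses an opposite-turn lookup table.
import Mathlib
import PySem

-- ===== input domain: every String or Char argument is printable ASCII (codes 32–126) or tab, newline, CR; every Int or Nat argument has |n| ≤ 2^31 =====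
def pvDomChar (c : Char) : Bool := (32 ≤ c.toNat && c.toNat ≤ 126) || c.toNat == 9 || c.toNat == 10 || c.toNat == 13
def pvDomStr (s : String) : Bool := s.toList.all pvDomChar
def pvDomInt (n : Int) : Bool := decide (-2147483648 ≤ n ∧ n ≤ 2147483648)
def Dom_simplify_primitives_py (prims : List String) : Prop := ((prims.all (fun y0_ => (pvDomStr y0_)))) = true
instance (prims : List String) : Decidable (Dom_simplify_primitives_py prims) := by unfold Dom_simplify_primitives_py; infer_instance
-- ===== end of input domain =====

-- B replaces A's in-place slice surgery with index rescans by a functional linear sweep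
-- (collapsing triples with immediate re-examination) repeated to a fixpoint; same return value.

-- ===== PORT A =====
-- phase 1: Python's stack with append/pop at the end (stack[-1] = getLast?, pop = dropLast)
def pvA_phase1 (stack : List String) : List String → List String
  | [] => stack
  | p :: rest =>
    match stack.getLast? with
    | some t =>
        if (t = "TurnCW" ∧ p = "TurnCCW") ∨ (t = "TurnCCW" ∧ p = "TurnCW") then
          pvA_phase1 stack.dropLast rest
        else
          pvA_phase1 (stack ++ [p]) rest
    | none => pvA_phase1 (stack ++ [p]) rest

-- inner `while i <= len(stack) - 3` scan; tri = stack[i:i+3] is (s.drop i).take 3 (inlined), and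
-- the slice assignment stack[i:i+3] = [x] is s.take i ++ [x] ++ s.drop (i+3) (exact: 0 ≤ i, i+3 ≤ len)
def pvA_scan (s : List String) (i : Nat) (changed : Bool) : List String × Bool :=
  if h : i + 3 ≤ s.length then
    if (s.drop i).take 3 = ["TurnCW", "TurnCW", "TurnCW"] then
      pvA_scan (s.take i ++ ["TurnCCW"] ++ s.drop (i + 3)) i true
    else if (s.drop i).take 3 = ["TurnCCW", "TurnCCW", "TurnCCW"] then
      pvA_scan (s.take i ++ ["TurnCW"] ++ s.drop (i + 3)) i true
    else
      pvA_scan s (i + 1) changed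
  else
    (s, changed)
termination_by s.length - i
decreasing_by all_goals (first | (simp; omega) | simp | omega)

-- `while changed` loop, with explicit fuel: each changed pass strictly shortens the stack,
-- so stack.length + 1 rounds always reach the fixpoint (pvA_outer_eq_norm below)
def pvA_outer (fuel : Nat) (s : List String) : List String :=
  match fuel with
  | 0 => s
  | fuel + 1 =>
      let r := pvA_scan s 0 false
      if r.2 then pvA_outer fuel r.1 else r.1

def simplify_primitives_py (prims : List String) : List String :=
  pvA_outer ((pvA_phase1 [] prims).length + 1) (pvA_phase1 [] prims)

-- ===== PORT B =====
-- _OPPOSITE.get(t): some opposite turn, or none for a non-turn token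
def pvOpp? (t : String) : Option String :=
  if t = "TurnCW" then some "TurnCCW"
  else if t = "TurnCCW" then some "TurnCW"
  else none

-- phase 1 of Source B: cancellation stack, `p == _OPPOSITE.get(stack[-1])`
def pvB_phase1 (stack : List String) : List String → List String
  | [] => stack
  | p :: rest =>
    match stack.getLast? with
    | some t =>
        if pvOpp? t = some p then pvB_phase1 stack.dropLast rest
        else pvB_phase1 (stack ++ [p]) rest
    | none => pvB_phase1 (stack ++ [p]) rest

-- inner `while cur in _OPPOSITE and i+1 < n and s[i] == cur and s[i+1] == cur` loop
def pvB_inner (s : List String) (n : Nat) (cur : String) (i : Nat) : String × Nat :=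
  match pvOpp? cur with
  | some o =>
      if i + 1 < n ∧ s.getD i "" = cur ∧ s.getD (i + 1) "" = cur then
        pvB_inner s n o (i + 2)
      else (cur, i)
  | none => (cur, i)
termination_by n - i
decreasing_by omega

-- outer `while i < n` loop of _compress_once; the inner loop only moves i forward
-- (pvB_inner_gt below), so `max … (i+1)` is the identity — it only carries the measure
def pvB_sweep_loop (s : List String) (n : Nat) (out : List String) (i : Nat) : List String :=
  if h : i < n then
    pvB_sweep_loop s n (out ++ [(pvB_inner s n (s.getD i "") (i + 1)).1])
      (max (pvB_inner s n (s.getD i "") (i + 1)).2 (i + 1))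
  else out
termination_by n - i
decreasing_by omega

def pvB_compress_once (s : List String) : List String :=
  pvB_sweep_loop s s.length [] 0

-- `while True` sweep-to-fixpoint loop, with explicit fuel: a changed sweep strictly
-- shortens the list, so length + 1 rounds suffice (pvB_loop_eq_norm below)
def pvB_loop (fuel : Nat) (s : List String) : List String :=
  match fuel with
  | 0 => s
  | fuel + 1 =>
      let s2 := pvB_compress_once s
      if s2 = s then s else pvB_loop fuel s2

def simplify_primitives_py_alt (prims : List String) : List String :=
  pvB_loop ((pvB_phase1 [] prims).length + 1) (pvB_phase1 [] prims)

-- ===== PRECONDITION & SPEC =====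
def Spec_simplify_primitives_py (prims : List String) (out : List String) : Prop := out = simplify_primitives_py_alt prims
instance (prims : List String) (out : List String) : Decidable (Spec_simplify_primitives_py prims out) := by unfold Spec_simplify_primitives_py; infer_instance

-- ===== CLAIM (what is proved, stated in full; the proofs are below) =====
def Claim_equal_simplify_primitives_py : Prop := ∀ (prims : List String), Dom_simplify_primitives_py prims → Spec_simplify_primitives_py prims (simplify_primitives_py prims)

-- ===== LEMMAS AND PROOFS =====

-- `passR`: reference form of one left-to-right compression sweep
-- (both sweep implementations are proved equal to it).
def passR : List String → List String
  | x :: y :: z :: r =>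
    if x = "TurnCW" ∧ y = "TurnCW" ∧ z = "TurnCW" then passR ("TurnCCW" :: r)
    else if x = "TurnCCW" ∧ y = "TurnCCW" ∧ z = "TurnCCW" then passR ("TurnCW" :: r)
    else x :: passR (y :: z :: r)
  | [] => []
  | [x] => [x]
  | [x, y] => [x, y]
termination_by s => s.length
decreasing_by all_goals (first | (simp; omega) | simp | omega)

theorem passR_len (s : List String) : (passR s).length ≤ s.length := by
  induction s using passR.induct with
  | case1 x y z r h ih => rw [passR, if_pos h]; simp at ih ⊢; omega
  | case2 x y z r h1 h2 ih => rw [passR, if_neg h1, if_pos h2]; simp at ih ⊢; omega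
  | case3 x y z r h1 h2 ih => rw [passR, if_neg h1, if_neg h2]; simp at ih ⊢; omega
  | case4 => simp [passR]
  | case5 x => simp [passR]
  | case6 x y => simp [passR]

theorem passR_shrink (s : List String) (h : passR s ≠ s) :
    (passR s).length + 2 ≤ s.length := by
  induction s using passR.induct with
  | case1 x y z r h1 ih =>
      rw [passR, if_pos h1] at h ⊢
      have := passR_len ("TurnCCW" :: r); simp at this ⊢; omega
  | case2 x y z r h1 h2 ih =>
      rw [passR, if_neg h1, if_pos h2] at h ⊢
      have := passR_len ("TurnCW" :: r); simp at this ⊢; omega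
  | case3 x y z r h1 h2 ih =>
      rw [passR, if_neg h1, if_neg h2] at h ⊢
      have hne : passR (y :: z :: r) ≠ y :: z :: r := by
        intro he; exact h (by rw [he])
      have := ih hne; simp at this ⊢; omega
  | case4 => simp [passR] at h
  | case5 x => simp [passR] at h
  | case6 x y => simp [passR] at h

theorem pvA_scan_eq (s : List String) (i : Nat) (c : Bool) :
    pvA_scan s i c =
      (s.take i ++ passR (s.drop i), c || decide (passR (s.drop i) ≠ s.drop i)) := by
  induction s, i, c using pvA_scan.induct with
  | case1 s i c h h1 ih =>
      have hdrop : s.drop i = "TurnCW" :: "TurnCW" :: "TurnCW" :: s.drop (i + 3) := by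
        have e := List.take_append_drop 3 (s.drop i)
        rw [h1, List.drop_drop] at e
        exact e.symm
      have hlen : (s.take i).length = i := by simp; omega
      have e1 : (s.take i ++ ["TurnCCW"] ++ s.drop (i + 3)).take i = s.take i := by
        rw [List.take_append_of_le_length (by simp; omega),
            List.take_append_of_le_length (by simp; omega), List.take_take]
        simp
      have e2 : (s.take i ++ ["TurnCCW"] ++ s.drop (i + 3)).drop i = "TurnCCW" :: s.drop (i + 3) := by
        rw [List.drop_append_of_le_length (by simp; omega),
            List.drop_append_of_le_length (by simp; omega),
            List.drop_eq_nil_of_le (by simp)]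
        simp
      rw [pvA_scan, dif_pos h, if_pos h1, ih, e1, e2, hdrop]
      rw [show passR ("TurnCW" :: "TurnCW" :: "TurnCW" :: s.drop (i + 3)) = passR ("TurnCCW" :: s.drop (i + 3)) from by
        rw [passR, if_pos ⟨rfl, rfl, rfl⟩]]
      have hl := passR_len ("TurnCCW" :: s.drop (i + 3))
      have hne : passR ("TurnCCW" :: s.drop (i + 3)) ≠ "TurnCW" :: "TurnCW" :: "TurnCW" :: s.drop (i + 3) := by
        intro he; have := congrArg List.length he; simp at this hl; omega
      simp [hne]
  | case2 s i c h h1 h2 ih =>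
      have hdrop : s.drop i = "TurnCCW" :: "TurnCCW" :: "TurnCCW" :: s.drop (i + 3) := by
        have e := List.take_append_drop 3 (s.drop i)
        rw [h2, List.drop_drop] at e
        exact e.symm
      have hlen : (s.take i).length = i := by simp; omega
      have e1 : (s.take i ++ ["TurnCW"] ++ s.drop (i + 3)).take i = s.take i := by
        rw [List.take_append_of_le_length (by simp; omega),
            List.take_append_of_le_length (by simp; omega), List.take_take]
        simp
      have e2 : (s.take i ++ ["TurnCW"] ++ s.drop (i + 3)).drop i = "TurnCW" :: s.drop (i + 3) := by
        rw [List.drop_append_of_le_length (by simp; omega),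
            List.drop_append_of_le_length (by simp; omega),
            List.drop_eq_nil_of_le (by simp)]
        simp
      rw [pvA_scan, dif_pos h, if_neg h1, if_pos h2, ih, e1, e2, hdrop]
      rw [show passR ("TurnCCW" :: "TurnCCW" :: "TurnCCW" :: s.drop (i + 3)) = passR ("TurnCW" :: s.drop (i + 3)) from by
        rw [passR, if_neg (by simp), if_pos ⟨rfl, rfl, rfl⟩]]
      have hl := passR_len ("TurnCW" :: s.drop (i + 3))
      have hne : passR ("TurnCW" :: s.drop (i + 3)) ≠ "TurnCCW" :: "TurnCCW" :: "TurnCCW" :: s.drop (i + 3) := by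
        intro he; have := congrArg List.length he; simp at this hl; omega
      simp [hne]
  | case3 s i c h h1 h2 ih =>
      have hi : i < s.length := by omega
      have hi1 : i + 1 < s.length := by omega
      have hi2 : i + 2 < s.length := by omega
      have d0 : s.drop i = s[i] :: s.drop (i + 1) := List.drop_eq_getElem_cons hi
      have d1 : s.drop (i + 1) = s[i + 1] :: s.drop (i + 2) := List.drop_eq_getElem_cons hi1
      have d2 : s.drop (i + 2) = s[i + 2] :: s.drop (i + 3) := List.drop_eq_getElem_cons hi2
      have dfull : s.drop i = s[i] :: s[i + 1] :: s[i + 2] :: s.drop (i + 3) := by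
        rw [d0, d1, d2]
      have htri : (s.drop i).take 3 = [s[i], s[i + 1], s[i + 2]] := by rw [dfull]; rfl
      have hx : ¬(s[i] = "TurnCW" ∧ s[i + 1] = "TurnCW" ∧ s[i + 2] = "TurnCW") := by
        intro ⟨a, b, c'⟩; exact h1 (by rw [htri, a, b, c'])
      have hy : ¬(s[i] = "TurnCCW" ∧ s[i + 1] = "TurnCCW" ∧ s[i + 2] = "TurnCCW") := by
        intro ⟨a, b, c'⟩; exact h2 (by rw [htri, a, b, c'])
      have hpass : passR (s.drop i) = s[i] :: passR (s.drop (i + 1)) := by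
        rw [dfull, passR, if_neg hx, if_neg hy, d1, d2]
      have htake : s.take (i + 1) = s.take i ++ [s[i]] := by
        rw [List.take_succ, List.getElem?_eq_getElem hi]; rfl
      rw [pvA_scan, dif_pos h, if_neg h1, if_neg h2, ih, hpass, Prod.mk.injEq]
      have hneq : (¬passR (s.drop (i + 1)) = s.drop (i + 1)) ↔
          (¬s[i] :: passR (s.drop (i + 1)) = s.drop i) := by
        rw [d0]
        constructor
        · intro hne he; exact hne (by injection he)
        · intro hne he; exact hne (by rw [he])
      refine ⟨?_, ?_⟩
      · rw [htake, List.append_assoc, List.singleton_append]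
      · congr 1
        rw [decide_eq_decide]
        exact hneq
  | case4 s i c h =>
      rw [pvA_scan, dif_neg h]
      have hfix : passR (s.drop i) = s.drop i := by
        have hl : (s.drop i).length < 3 := by simp only [List.length_drop]; omega
        match hm : s.drop i with
        | [] => simp [passR]
        | [a] => simp [passR]
        | [a, b] => simp [passR]
        | a :: b :: c' :: r =>
            exfalso
            have hlen3 := congrArg List.length hm
            simp only [List.length_drop, List.length_cons] at hlen3
            omega
      rw [hfix, List.take_append_drop]
      simp

theorem pvB_inner_gt (s : List String) (n : Nat) (cur : String) (i : Nat) :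
    i ≤ (pvB_inner s n cur i).2 := by
  induction cur, i using pvB_inner.induct (s := s) (n := n) with
  | case1 cur i o h hc ih => rw [pvB_inner, h]; simp only [if_pos hc]; omega
  | case2 cur i o h hc => rw [pvB_inner, h]; simp only [if_neg hc]; omega
  | case3 cur i h => rw [pvB_inner, h]

-- head step of passR when the head window is not a collapsing triple
theorem passR_cons_of_not_triple (t : String) (l : List String)
    (h : ∀ a b r, l = a :: b :: r → ¬(a = t ∧ b = t ∧ (t = "TurnCW" ∨ t = "TurnCCW"))) :
    passR (t :: l) = t :: passR l := by
  match l with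
  | [] => simp [passR]
  | [a] => simp [passR]
  | a :: b :: r =>
      have hn := h a b r rfl
      rw [passR, if_neg, if_neg]
      · intro ⟨u, v, w⟩; exact hn ⟨by rw [v, ← u], by rw [w, ← u], Or.inr u⟩
      · intro ⟨u, v, w⟩; exact hn ⟨by rw [v, ← u], by rw [w, ← u], Or.inl u⟩

theorem pvB_inner_eq (s : List String) (cur : String) (i : Nat) :
    passR (cur :: s.drop i) =
      (pvB_inner s s.length cur i).1 :: passR (s.drop (pvB_inner s s.length cur i).2) := by
  induction cur, i using pvB_inner.induct (s := s) (n := s.length) with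
  | case1 cur i o h hc ih =>
      rw [pvB_inner, h]
      simp only [if_pos hc]
      obtain ⟨hlt, h1, h2⟩ := hc
      have hi : i < s.length := by omega
      have g1 : (s[i] : String) = cur := by rw [← List.getD_eq_getElem s "" hi]; exact h1
      have g2 : (s[i + 1] : String) = cur := by rw [← List.getD_eq_getElem s "" hlt]; exact h2
      have hdrop : s.drop i = cur :: cur :: s.drop (i + 2) := by
        rw [List.drop_eq_getElem_cons hi, List.drop_eq_getElem_cons hlt, g1, g2]
      rw [hdrop]
      have hcur : (cur = "TurnCW" ∧ o = "TurnCCW") ∨ (cur = "TurnCCW" ∧ o = "TurnCW") := by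
        unfold pvOpp? at h
        split_ifs at h with u v
        · exact Or.inl ⟨u, by injection h with h'; exact h'.symm⟩
        · exact Or.inr ⟨v, by injection h with h'; exact h'.symm⟩
      have hstep : passR (cur :: cur :: cur :: s.drop (i + 2)) = passR (o :: s.drop (i + 2)) := by
        rcases hcur with ⟨u, v⟩ | ⟨u, v⟩
        · subst u; subst v; rw [passR, if_pos ⟨rfl, rfl, rfl⟩]
        · subst u; subst v; rw [passR, if_neg (by simp), if_pos ⟨rfl, rfl, rfl⟩]
      rw [hstep, ih]
  | case2 cur i o h hc =>
      rw [pvB_inner, h]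
      simp only [if_neg hc]
      refine passR_cons_of_not_triple cur _ ?_
      intro a b r hl ⟨ha, hb, _⟩
      have hlt : i + 1 < s.length := by
        have := congrArg List.length hl; simp at this; omega
      have hi : i < s.length := by omega
      have d0 : s.drop i = s[i] :: s.drop (i + 1) := List.drop_eq_getElem_cons hi
      have d1 : s.drop (i + 1) = s[i + 1] :: s.drop (i + 2) := List.drop_eq_getElem_cons hlt
      rw [d0, d1] at hl
      have ga : (s[i] : String) = a := by injection hl
      have hl2 : (s[i + 1] : String) :: s.drop (i + 2) = b :: r := by injection hl
      have gb : (s[i + 1] : String) = b := by injection hl2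
      exact hc ⟨hlt, by rw [List.getD_eq_getElem s "" hi, ga, ha],
        by rw [List.getD_eq_getElem s "" hlt, gb, hb]⟩
  | case3 cur i h =>
      rw [pvB_inner, h]
      refine passR_cons_of_not_triple cur _ ?_
      intro a b r _ ⟨_, _, hturn⟩
      unfold pvOpp? at h
      rcases hturn with u | u <;> simp [u] at h

theorem pvB_sweep_loop_eq (s : List String) (out : List String) (i : Nat) :
    pvB_sweep_loop s s.length out i = out ++ passR (s.drop i) := by
  induction out, i using pvB_sweep_loop.induct (s := s) (n := s.length) with
  | case1 out i h ih =>
      have hge := pvB_inner_gt s s.length (s.getD i "") (i + 1)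
      rw [pvB_sweep_loop, dif_pos h, ih]
      have hdrop : s.drop i = s.getD i "" :: s.drop (i + 1) := by
        rw [List.getD_eq_getElem s "" h]
        exact List.drop_eq_getElem_cons h
      rw [Nat.max_eq_left hge, hdrop, pvB_inner_eq s (s.getD i "") (i + 1),
        List.append_assoc, List.singleton_append]
  | case2 out i h =>
      rw [pvB_sweep_loop, dif_neg h, List.drop_eq_nil_of_le (by omega)]
      simp [passR]

theorem pvB_compress_once_eq (s : List String) : pvB_compress_once s = passR s := by
  rw [pvB_compress_once, pvB_sweep_loop_eq]; simp

-- both phase-1 stacks are the same list (the two cancellation tests agree)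
theorem phase1_agree (prims : List String) (stack : List String) :
    pvA_phase1 stack prims = pvB_phase1 stack prims := by
  induction prims generalizing stack with
  | nil => rfl
  | cons p rest ih =>
      rw [pvA_phase1, pvB_phase1]
      match stack.getLast? with
      | none => exact ih _
      | some t =>
          simp only
          have hcond : (pvOpp? t = some p) ↔
              ((t = "TurnCW" ∧ p = "TurnCCW") ∨ (t = "TurnCCW" ∧ p = "TurnCW")) := by
            unfold pvOpp?
            split_ifs with u v <;> simp_all [eq_comm]
          by_cases hc : (t = "TurnCW" ∧ p = "TurnCCW") ∨ (t = "TurnCCW" ∧ p = "TurnCW")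
          · rw [if_pos hc, if_pos (hcond.mpr hc)]; exact ih _
          · rw [if_neg hc, if_neg (fun h => hc (hcond.mp h))]; exact ih _

def normOuter (s : List String) : List String :=
  if passR s = s then s else normOuter (passR s)
termination_by s.length
decreasing_by
  rename_i h
  have := passR_shrink s h
  omega

theorem pvA_outer_eq_norm (f : Nat) (s : List String) (hf : s.length < f) :
    pvA_outer f s = normOuter s := by
  induction f generalizing s with
  | zero => omega
  | succ f ih =>
      rw [pvA_outer, normOuter.eq_def, pvA_scan_eq]
      simp only [List.take_zero, List.drop_zero, List.nil_append, Bool.false_or]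
      by_cases hfix : passR s = s
      · simp [hfix]
      · have hsh := passR_shrink s hfix
        simp only [hfix, if_false, ne_eq, not_false_eq_true, decide_true, if_true]
        exact ih (passR s) (by omega)

theorem pvB_loop_eq_norm (f : Nat) (s : List String) (hf : s.length < f) :
    pvB_loop f s = normOuter s := by
  induction f generalizing s with
  | zero => omega
  | succ f ih =>
      rw [pvB_loop, normOuter.eq_def, pvB_compress_once_eq]
      by_cases hfix : passR s = s
      · simp [hfix]
      · have hsh := passR_shrink s hfix
        simp only [hfix, if_false]
        exact ih (passR s) (by omega)

-- ===== VERDICT (by name: the statement is the Claim_ definition above) =====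
theorem simplify_primitives_py_spec : Claim_equal_simplify_primitives_py := by
  intro prims _
  unfold Spec_simplify_primitives_py simplify_primitives_py simplify_primitives_py_alt
  rw [phase1_agree prims [], pvA_outer_eq_norm _ _ (by omega), pvB_loop_eq_norm _ _ (by omega)]
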